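-- pv_equiv track=rewrite | github.com/smartresponsor/documentating | tools/select_quality_atlas_targets.py | classify_changes
-- ===== SOURCE A (Python) =====
-- from typing import Any
--
-- def classify_changes(paths: list[str], policy: dict[str, Any]) -> tuple[bool, list[str], list[str]]:
--     meaningful_prefixes = policy.get('meaningful_path_prefixes') or []
--     noise_prefixes = policy.get('noise_path_prefixes') or []
--     meaningful: list[str] = []
--     noise: list[str] = []
--     for path in paths:
--         if any(path == prefix or path.startswith(prefix) for prefix in noise_prefixes):
--             noise.append(path)
--             continue
--         if any(path == prefix or path.startswith(prefix) for prefix in meaningful_prefixes):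
--             meaningful.append(path)
--             continue
--         meaningful.append(path)
--     return bool(meaningful), meaningful[:20], noise[:20]
-- ===== SOURCE B (Python) =====
-- def classify_changes(paths, policy):
--     # Build a character trie of the noise prefixes once, so each path is
--     # classified in O(len(path)) trie steps instead of scanning all prefixes;
--     # startswith subsumes A's equality test, and every non-noise path is
--     # meaningful (A's meaningful-prefix scan picks between identical branches).
--     noise_prefixes = policy.get('noise_path_prefixes') or []
--     root = [False, {}]  # node = [terminal?, children]
--     for pre in noise_prefixes:
--         node = root
--         for ch in pre:
--             node = node[1].setdefault(ch, [False, {}])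
--         node[0] = True
--
--     def is_noise(path):
--         node = root
--         if node[0]:
--             return True
--         for ch in path:
--             node = node[1].get(ch)
--             if node is None:
--                 return False
--             if node[0]:
--                 return True
--         return False
--
--     noise = [p for p in paths if is_noise(p)]
--     meaningful = [p for p in paths if not is_noise(p)]
--     return bool(meaningful), meaningful[:20], noise[:20]
-- ===== Notes on version B (the rewrite author's own statement) =====
-- stated objective: faster
-- what changed: B compiles the noise prefixes into a character trie built once and classifies each path by a single trie walk (dropping A's per-path scan over every prefix, the redundant equality test and the vacuous meaningful-prefix scan), then builds the two output lists by staged filters.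
import Mathlib
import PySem

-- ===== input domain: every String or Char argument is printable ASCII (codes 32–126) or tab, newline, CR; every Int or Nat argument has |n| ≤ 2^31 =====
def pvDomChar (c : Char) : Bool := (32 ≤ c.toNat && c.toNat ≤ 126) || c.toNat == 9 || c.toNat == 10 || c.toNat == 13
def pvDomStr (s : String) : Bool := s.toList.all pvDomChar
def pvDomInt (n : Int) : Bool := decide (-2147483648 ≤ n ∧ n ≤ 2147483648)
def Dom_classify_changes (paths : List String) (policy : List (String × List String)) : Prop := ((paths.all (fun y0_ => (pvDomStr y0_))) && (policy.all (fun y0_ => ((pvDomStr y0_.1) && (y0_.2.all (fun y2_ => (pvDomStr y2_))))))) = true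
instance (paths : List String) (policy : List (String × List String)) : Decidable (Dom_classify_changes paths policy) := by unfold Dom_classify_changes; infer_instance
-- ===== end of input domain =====

-- B: a character trie of the noise prefixes built once, each path classified by one trie
-- walk, outputs built by staged filters — instead of A's per-path scan over every prefix.


-- ===== PORT A =====
def classify_changes (paths : List String) (policy : List (String × List String)) : Bool × List String × List String :=
  -- policy.get(k) or [] : a missing key and an empty-list value both give []
  let meaningful_prefixes := (PySem.Dict.get? (PySem.Dict.ofList policy) "meaningful_path_prefixes").getD []
  let noise_prefixes := (PySem.Dict.get? (PySem.Dict.ofList policy) "noise_path_prefixes").getD []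
  let r := paths.foldl (fun (acc : List String × List String) path =>
    if noise_prefixes.any (fun prefix_ => path == prefix_ || PySem.Str.startswith path prefix_) then
      (acc.1, acc.2 ++ [path])
    else if meaningful_prefixes.any (fun prefix_ => path == prefix_ || PySem.Str.startswith path prefix_) then
      (acc.1 ++ [path], acc.2)
    else
      (acc.1 ++ [path], acc.2)) ([], [])
  (!r.1.isEmpty, PySem.List.slice r.1 none (some 20), PySem.List.slice r.2 none (some 20))

-- ===== PORT B =====
-- trie node = [terminal?, children]; mutual pair instead of a nested inductive
mutual
inductive PvTrie where
  | mk : Bool → PvChildren → PvTrie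
inductive PvChildren where
  | nil : PvChildren
  | cons : Char → PvTrie → PvChildren → PvChildren
end

def PvTrie.empty : PvTrie := .mk false .nil

def PvChildren.find? : PvChildren → Char → Option PvTrie
  | .nil, _ => none
  | .cons c t rest, d => if c = d then some t else rest.find? d

-- children[c] = t, replacing in place or appending (dict setdefault behaviour)
def PvChildren.set : PvChildren → Char → PvTrie → PvChildren
  | .nil, c, t => .cons c t .nil
  | .cons c' t' rest, c, t => if c' = c then .cons c' t rest else .cons c' t' (rest.set c t)

-- the inner 'for ch in pre: node = node[1].setdefault(ch, ...)' + terminal mark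
def PvTrie.insert : PvTrie → List Char → PvTrie
  | .mk _ ch, [] => .mk true ch
  | .mk b ch, c :: p => .mk b (ch.set c (((ch.find? c).getD PvTrie.empty).insert p))

-- is_noise: walk the trie along the path, true as soon as a terminal node is met
def PvTrie.matches : PvTrie → List Char → Bool
  | .mk b _, [] => b
  | .mk b ch, c :: cs => b || (match ch.find? c with | none => false | some t => t.matches cs)

def classify_changes_alt (paths : List String) (policy : List (String × List String)) : Bool × List String × List String :=
  let noise_prefixes := (PySem.Dict.get? (PySem.Dict.ofList policy) "noise_path_prefixes").getD []
  let root := noise_prefixes.foldl (fun t p => t.insert p.toList) PvTrie.empty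
  let noise := paths.filter (fun p => root.matches p.toList)
  let meaningful := paths.filter (fun p => !root.matches p.toList)
  (!meaningful.isEmpty, PySem.List.slice meaningful none (some 20), PySem.List.slice noise none (some 20))

-- ===== PRECONDITION & SPEC =====
def Spec_classify_changes (paths : List String) (policy : List (String × List String)) (out : Bool × List String × List String) : Prop := out = classify_changes_alt paths policy
instance (paths : List String) (policy : List (String × List String)) (out : Bool × List String × List String) : Decidable (Spec_classify_changes paths policy out) := by unfold Spec_classify_changes; infer_instance

-- ===== CLAIM (what is proved, stated in full; the proofs are below) =====
def Claim_equal_classify_changes : Prop := ∀ (paths : List String) (policy : List (String × List String)), Dom_classify_changes paths policy → Spec_classify_changes paths policy (classify_changes paths policy)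

-- ===== LEMMAS AND PROOFS =====

theorem pvEmpty_matches (cs : List Char) : PvTrie.empty.matches cs = false := by
  cases cs <;> simp [PvTrie.empty, PvTrie.matches, PvChildren.find?]

theorem pvFind_set_self : ∀ (ch : PvChildren) (c : Char) (t : PvTrie),
    (ch.set c t).find? c = some t
  | .nil, c, t => by simp [PvChildren.set, PvChildren.find?]
  | .cons c' t' rest, c, t => by
    by_cases h : c' = c
    · simp [PvChildren.set, PvChildren.find?, h]
    · simp [PvChildren.set, PvChildren.find?, h, pvFind_set_self rest c t]

theorem pvFind_set_ne : ∀ (ch : PvChildren) (c : Char) (t : PvTrie) (d : Char), c ≠ d →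
    (ch.set c t).find? d = ch.find? d
  | .nil, c, t, d, h => by simp [PvChildren.set, PvChildren.find?, h]
  | .cons c' t' rest, c, t, d, h => by
    by_cases h' : c' = c
    · subst h'; simp [PvChildren.set, PvChildren.find?, h]
    · simp only [PvChildren.set, if_neg h', PvChildren.find?, pvFind_set_ne rest c t d h]

theorem pvMatches_insert (p : List Char) (t : PvTrie) (cs : List Char) :
    (t.insert p).matches cs = (t.matches cs || p.isPrefixOf cs) := by
  induction p generalizing t cs with
  | nil =>
    obtain ⟨b, ch⟩ := t
    cases cs <;> simp [PvTrie.insert, PvTrie.matches, List.isPrefixOf]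
  | cons c p ih =>
    obtain ⟨b, ch⟩ := t
    cases cs with
    | nil => simp [PvTrie.insert, PvTrie.matches, List.isPrefixOf]
    | cons d cs' =>
      by_cases h : c = d
      · subst h
        simp only [PvTrie.insert, PvTrie.matches, pvFind_set_self, ih, List.isPrefixOf,
          BEq.rfl, Bool.true_and]
        cases hf : ch.find? c <;>
          simp [pvEmpty_matches, Bool.or_assoc]
      · simp only [PvTrie.insert, PvTrie.matches, pvFind_set_ne ch c _ d h, List.isPrefixOf]
        have : (c == d) = false := by simp [h]
        simp [this]

theorem pvMatches_foldl (ps : List String) (t : PvTrie) (cs : List Char) :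
    (ps.foldl (fun t p => t.insert p.toList) t).matches cs
      = (t.matches cs || ps.any (fun p => p.toList.isPrefixOf cs)) := by
  induction ps generalizing t with
  | nil => simp
  | cons p ps ih => simp [ih, pvMatches_insert, Bool.or_assoc]

-- A's test for one prefix: the equality check is subsumed, startswith = list prefix
theorem pvTest_eq (path pre : String) :
    (path == pre || PySem.Str.startswith path pre) = pre.toList.isPrefixOf path.toList := by
  have h1 : (path == pre || PySem.Str.startswith path pre) = PySem.Str.startswith path pre := by
    by_cases h : path = pre
    · subst h; simp [PySem.Chars.startswith_iff]
    · simp [h]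
  rw [h1]
  simp only [PySem.Str.startswith_eq]
  rw [Bool.eq_iff_iff, PySem.Chars.startswith_iff, List.isPrefixOf_iff_prefix]

-- A's per-path test equals B's trie walk
theorem pvNoise_eq (np : List String) (path : String) :
    np.any (fun prefix_ => path == prefix_ || PySem.Str.startswith path prefix_)
      = (np.foldl (fun t p => t.insert p.toList) PvTrie.empty).matches path.toList := by
  rw [pvMatches_foldl, pvEmpty_matches, Bool.false_or]
  simp only [pvTest_eq]

-- A's fold appends each path to one of the two filters
theorem pvFoldA (np mp : List String) (paths : List String) (m n : List String) :
    paths.foldl (fun (acc : List String × List String) path =>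
      if np.any (fun prefix_ => path == prefix_ || PySem.Str.startswith path prefix_) then
        (acc.1, acc.2 ++ [path])
      else if mp.any (fun prefix_ => path == prefix_ || PySem.Str.startswith path prefix_) then
        (acc.1 ++ [path], acc.2)
      else
        (acc.1 ++ [path], acc.2)) (m, n)
    = (m ++ paths.filter (fun path => !np.any (fun prefix_ => path == prefix_ || PySem.Str.startswith path prefix_)),
       n ++ paths.filter (fun path => np.any (fun prefix_ => path == prefix_ || PySem.Str.startswith path prefix_))) := by
  induction paths generalizing m n with
  | nil => simp
  | cons p rest ih =>
    simp only [List.foldl_cons, List.filter_cons]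
    by_cases h : np.any (fun prefix_ => p == prefix_ || PySem.Str.startswith p prefix_)
    · rw [if_pos h]
      simp only [h, Bool.not_true, if_true]
      rw [ih]
      simp [List.append_assoc]
    · rw [if_neg h]
      have hsame : (if mp.any (fun prefix_ => p == prefix_ || PySem.Str.startswith p prefix_)
          then ((m, n).1 ++ [p], (m, n).2) else ((m, n).1 ++ [p], (m, n).2)) = (m ++ [p], n) := by
        split_ifs <;> rfl
      rw [hsame]
      simp only [Bool.not_eq_true] at h
      simp only [h, Bool.not_false, if_true]
      rw [ih]
      simp [List.append_assoc]

-- ===== VERDICT (by name: the statement is the Claim_ definition above) =====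
theorem classify_changes_spec : Claim_equal_classify_changes := by
  intro paths policy _
  unfold Spec_classify_changes
  simp only [classify_changes, classify_changes_alt]
  rw [pvFoldA]
  simp only [List.nil_append]
  have h1 : (fun path => ((PySem.Dict.get? (PySem.Dict.ofList policy) "noise_path_prefixes").getD []).any
        (fun prefix_ => path == prefix_ || PySem.Str.startswith path prefix_))
      = (fun p => ((((PySem.Dict.get? (PySem.Dict.ofList policy) "noise_path_prefixes").getD []).foldl
          (fun t q => t.insert q.toList) PvTrie.empty)).matches p.toList) :=
    funext fun p => pvNoise_eq _ p
  have h2 : (fun path => !((PySem.Dict.get? (PySem.Dict.ofList policy) "noise_path_prefixes").getD []).any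
        (fun prefix_ => path == prefix_ || PySem.Str.startswith path prefix_))
      = (fun p => !((((PySem.Dict.get? (PySem.Dict.ofList policy) "noise_path_prefixes").getD []).foldl
          (fun t q => t.insert q.toList) PvTrie.empty)).matches p.toList) :=
    funext fun p => by rw [pvNoise_eq]
  rw [h1, h2]
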